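-- pv_equiv track=rewrite | github.com/jkurpost/ProRiboGen | sampler.py | format_token_lists
-- ===== SOURCE A (Python) =====
-- def format_token_lists(token_lists, end_id=0):
--     result = []
--
--     for token_list in token_lists:
--         if end_id not in token_list:
--             result.append(token_list)
--         else:
--
--             zero_index = token_list.index(end_id)
--
--             result.append(token_list[:zero_index])
--     return result
-- ===== SOURCE B (Python) =====
-- def format_token_lists(token_lists, end_id=0):
--     def truncate(token_list):
--         out = []
--         for tok in token_list:
--             if tok == end_id:
--                 break
--             out.append(tok)
--         return out
--     return [truncate(tl) for tl in token_lists]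
-- ===== Notes on version B (the rewrite author's own statement) =====
-- stated objective: simpler
-- what changed: Replaces the membership-test + .index + slice strategy (up to three scans per sublist) with a single forward scan per sublist that appends tokens and breaks at the first end_id, collected by a comprehension.
import Mathlib
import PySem

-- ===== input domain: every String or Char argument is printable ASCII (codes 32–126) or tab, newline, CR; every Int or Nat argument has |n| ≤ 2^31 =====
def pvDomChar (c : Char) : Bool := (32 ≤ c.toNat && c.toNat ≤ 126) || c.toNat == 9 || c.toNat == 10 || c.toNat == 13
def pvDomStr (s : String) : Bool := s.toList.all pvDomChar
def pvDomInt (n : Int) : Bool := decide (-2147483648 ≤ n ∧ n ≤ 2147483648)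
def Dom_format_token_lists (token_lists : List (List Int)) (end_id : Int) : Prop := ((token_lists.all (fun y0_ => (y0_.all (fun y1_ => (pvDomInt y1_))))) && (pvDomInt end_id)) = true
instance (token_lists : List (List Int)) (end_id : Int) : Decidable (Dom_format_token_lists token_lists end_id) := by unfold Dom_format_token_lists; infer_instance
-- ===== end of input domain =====

-- B truncates each sublist by a single forward scan that stops at the first end_id,
-- instead of A's membership test + .index + slice. Return values are equal; A may alias
-- the input sublist when end_id is absent, B always returns a fresh list (value-equal).

-- ===== PORT A =====
def format_token_lists (token_lists : List (List Int)) (end_id : Int) : List (List Int) :=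
  token_lists.foldl (fun result token_list =>
    if ¬ (end_id ∈ token_list) then
      result ++ [token_list]
    else
      match PySem.List.index? token_list end_id with
      | some zero_index => result ++ [PySem.List.slice token_list none (some (zero_index : Int))]
      | none => result ++ [token_list]  -- unreachable: guarded by the membership test
    ) []

-- ===== PORT B =====
-- inner loop of B: append tokens, break at the first end_id
def pvTruncate (end_id : Int) : List Int → List Int
  | [] => []
  | tok :: rest => if tok == end_id then [] else tok :: pvTruncate end_id rest

def format_token_lists_alt (token_lists : List (List Int)) (end_id : Int) : List (List Int) :=
  token_lists.map (pvTruncate end_id)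

-- ===== PRECONDITION & SPEC =====
def Spec_format_token_lists (token_lists : List (List Int)) (end_id : Int) (out : List (List Int)) : Prop := out = format_token_lists_alt token_lists end_id
instance (token_lists : List (List Int)) (end_id : Int) (out : List (List Int)) : Decidable (Spec_format_token_lists token_lists end_id out) := by unfold Spec_format_token_lists; infer_instance

-- ===== CLAIM (what is proved, stated in full; the proofs are below) =====
def Claim_equal_format_token_lists : Prop := ∀ (token_lists : List (List Int)) (end_id : Int), Dom_format_token_lists token_lists end_id → Spec_format_token_lists token_lists end_id (format_token_lists token_lists end_id)

-- ===== LEMMAS AND PROOFS =====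

-- A's per-sublist value, the match on .index, written as a function
def pvTruncA (e : Int) (l : List Int) : List Int :=
  match PySem.List.index? l e with
  | some i => PySem.List.slice l none (some (i : Int))
  | none => l

-- A's per-sublist value equals B's single forward scan.
lemma trunc_eq (e : Int) (l : List Int) : pvTruncA e l = pvTruncate e l := by
  induction l with
  | nil => rfl
  | cons x xs ih =>
    by_cases hx : x = e
    · subst hx
      unfold pvTruncA
      rw [PySem.List.index?_cons_self]
      show PySem.List.slice (x :: xs) none (some ((0:Nat) : Int)) = pvTruncate x (x :: xs)
      rw [PySem.List.slice_to_natCast]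
      simp [pvTruncate]
    · unfold pvTruncA at ih ⊢
      rw [PySem.List.index?_cons_of_ne xs hx]
      cases hidx : PySem.List.index? xs e with
      | none =>
        have ih' : xs = pvTruncate e xs := by rw [hidx] at ih; exact ih
        simp only [Option.map_none, pvTruncate, beq_iff_eq, hx, if_false]
        exact congrArg (x :: ·) ih'
      | some i =>
        have ih' : PySem.List.slice xs none (some (i : Int)) = pvTruncate e xs := by
          rw [hidx] at ih; exact ih
        simp only [Option.map_some]
        rw [PySem.List.slice_to_natCast]
        rw [PySem.List.slice_to_natCast] at ih'
        simp only [List.take_succ_cons, pvTruncate, beq_iff_eq, hx, if_false]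
        exact congrArg (x :: ·) ih'

theorem format_token_lists_spec : Claim_equal_format_token_lists := by
  intro token_lists end_id _
  unfold Spec_format_token_lists format_token_lists format_token_lists_alt
  have hbody : (fun (result : List (List Int)) (token_list : List Int) =>
      if ¬ (end_id ∈ token_list) then result ++ [token_list]
      else
        match PySem.List.index? token_list end_id with
        | some zero_index => result ++ [PySem.List.slice token_list none (some (zero_index : Int))]
        | none => result ++ [token_list])
      = (fun result tl => result ++ [pvTruncate end_id tl]) := by
    funext r tl
    rw [← trunc_eq]
    unfold pvTruncA
    by_cases hm : end_id ∈ tl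
    · simp only [hm, not_true_eq_false, if_false]
      cases PySem.List.index? tl end_id <;> rfl
    · simp only [hm, not_false_iff, if_true]
      rw [(PySem.List.index?_eq_none_iff tl end_id).mpr hm]
  rw [hbody, PySem.List.foldl_append_singleton_eq_map]
  rfl
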